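-- pv_equiv track=rewrite | github.com/mocmeo/algorithms | xor-queries-of-subarray.py | xorQueries
-- ===== SOURCE A (Python) =====
-- def xorQueries(arr, queries):
-- 	S = []
-- 	res = []
-- 	xor_arr = 0
-- 	for num in arr:
-- 		xor_arr ^= num
-- 		S.append(xor_arr)
--
-- 	for q in queries:
-- 		if q[0] == 0:
-- 			res.append(S[q[1]])
-- 		else:
-- 			res.append(S[q[1]] ^ S[q[0] - 1])
-- 	return res
-- ===== SOURCE B (Python) =====
-- def prefix_xor(arr, j):
-- 	"""XOR of arr[0] .. arr[j] inclusive (j may be a negative index)."""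
-- 	ans = arr[j]
-- 	for x in arr[:j]:
-- 		ans ^= x
-- 	return ans
--
-- def xorQueries(arr, queries):
-- 	res = []
-- 	for q in queries:
-- 		ans = prefix_xor(arr, q[1])
-- 		if q[0] != 0:
-- 			ans ^= prefix_xor(arr, q[0] - 1)
-- 		res.append(ans)
-- 	return res
-- ===== Notes on version B (the rewrite author's own statement) =====
-- stated objective: simpler
-- what changed: Drops A's precomputed prefix-XOR table: each query recomputes the needed prefix XOR(s) on the fly with a small helper that folds XOR over arr[:j] starting from arr[j], so no auxiliary list is maintained.
import Mathlib
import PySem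

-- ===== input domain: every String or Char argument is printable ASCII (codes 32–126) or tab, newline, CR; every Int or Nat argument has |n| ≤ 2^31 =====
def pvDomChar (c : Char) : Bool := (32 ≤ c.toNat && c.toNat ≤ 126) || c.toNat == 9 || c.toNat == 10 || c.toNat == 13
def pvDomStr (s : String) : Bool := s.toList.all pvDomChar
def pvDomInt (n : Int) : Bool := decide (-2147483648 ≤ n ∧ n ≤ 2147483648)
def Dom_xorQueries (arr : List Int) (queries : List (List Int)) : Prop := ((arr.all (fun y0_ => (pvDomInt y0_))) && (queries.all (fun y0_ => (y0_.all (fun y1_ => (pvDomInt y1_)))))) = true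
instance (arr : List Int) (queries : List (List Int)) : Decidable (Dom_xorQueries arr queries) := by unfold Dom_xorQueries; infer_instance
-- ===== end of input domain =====

-- B drops A's precomputed prefix-XOR table: each query recomputes the needed prefix XOR(s) on the fly (simpler, not faster).


-- ===== PORT A =====
-- prefix-XOR table S built left to right, then each query answered from S in O(1).
-- pyGetD's default 0 is never consulted under Pre_ (all indices proved in range there).
def xorQueries (arr : List Int) (queries : List (List Int)) : List Int :=
  let S := (arr.foldl (fun (st : List Int × Int) num =>
      (st.1 ++ [PySem.Int.bxor st.2 num], PySem.Int.bxor st.2 num)) ([], 0)).1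
  queries.foldl (fun res q =>
    if PySem.List.pyGetD q 0 0 = 0 then
      res ++ [PySem.List.pyGetD S (PySem.List.pyGetD q 1 0) 0]
    else
      res ++ [PySem.Int.bxor (PySem.List.pyGetD S (PySem.List.pyGetD q 1 0) 0)
                             (PySem.List.pyGetD S (PySem.List.pyGetD q 0 0 - 1) 0)]) []

-- ===== PORT B =====
-- Source B's prefix_xor helper: XOR of arr[0] .. arr[j] inclusive (j may be a negative index):
-- start from arr[j] and fold XOR over the slice arr[:j].
-- pyGetD's default 0 is never consulted under Pre_ (the index is proved in range there).
def prefixXor (arr : List Int) (j : Int) : Int :=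
  (PySem.List.slice arr none (some j)).foldl PySem.Int.bxor (PySem.List.pyGetD arr j 0)

-- no table: each query calls prefixXor on the fly.
def xorQueries_alt (arr : List Int) (queries : List (List Int)) : List Int :=
  queries.foldl (fun res q =>
    let ans := prefixXor arr (PySem.List.pyGetD q 1 0)
    let ans := if PySem.List.pyGetD q 0 0 ≠ 0 then
        PySem.Int.bxor ans (prefixXor arr (PySem.List.pyGetD q 0 0 - 1))
      else ans
    res ++ [ans]) []

-- ===== PRECONDITION & SPEC =====
-- Pre_ is exactly where Python A returns normally: each query has at least two entries, q[1] is a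
-- valid (possibly negative) Python index into the length-n prefix table, and q[0] is 0 or q[0]-1 is
-- such an index; outside Pre_ A raises IndexError.
def Pre_xorQueries (arr : List Int) (queries : List (List Int)) : Prop :=
  ∀ q ∈ queries, 2 ≤ q.length ∧
    -(arr.length : Int) ≤ q.getD 1 0 ∧ q.getD 1 0 < (arr.length : Int) ∧
    (q.getD 0 0 = 0 ∨ (1 - (arr.length : Int) ≤ q.getD 0 0 ∧ q.getD 0 0 ≤ (arr.length : Int)))
instance (arr : List Int) (queries : List (List Int)) : Decidable (Pre_xorQueries arr queries) := by unfold Pre_xorQueries; infer_instance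

def pvWitness_xorQueries : List Int × List (List Int) := ([1, 2, 3], [[0, 1], [1, 2], [0, 2]])

def Spec_xorQueries (arr : List Int) (queries : List (List Int)) (out : List Int) : Prop := out = xorQueries_alt arr queries
instance (arr : List Int) (queries : List (List Int)) (out : List Int) : Decidable (Spec_xorQueries arr queries out) := by unfold Spec_xorQueries; infer_instance

-- ===== CLAIM (what is proved, stated in full; the proofs are below) =====
def Claim_equal_xorQueries : Prop := ∀ (arr : List Int) (queries : List (List Int)), Dom_xorQueries arr queries → Pre_xorQueries arr queries → Spec_xorQueries arr queries (xorQueries arr queries)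

-- ===== LEMMAS AND PROOFS =====

-- sign/magnitude view of PySem.Int.bxor, used only to prove associativity (not in the prelude's book).
def pvMag (a : Int) : Nat := if 0 ≤ a then a.toNat else (-a - 1).toNat

lemma bxor_cases (x y : Int) :
    PySem.Int.bxor x y =
      if (0 ≤ x ↔ 0 ≤ y) then ((pvMag x ^^^ pvMag y : Nat) : Int)
      else -((pvMag x ^^^ pvMag y : Nat) : Int) - 1 := by
  unfold PySem.Int.bxor pvMag
  split_ifs with h1 h2 h3 h4 h5 h6 h7 <;> simp_all <;> omega

lemma bxor_nonneg_iff (x y : Int) : (0 ≤ PySem.Int.bxor x y) ↔ (0 ≤ x ↔ 0 ≤ y) := by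
  rw [bxor_cases]
  split_ifs with h <;> simp [h] <;> omega

lemma pvMag_bxor (x y : Int) : pvMag (PySem.Int.bxor x y) = pvMag x ^^^ pvMag y := by
  rw [bxor_cases]
  split_ifs with h <;> simp [pvMag] <;> omega

lemma eq_of_sign_mag {a b : Int} (h1 : (0 ≤ a) ↔ (0 ≤ b)) (h2 : pvMag a = pvMag b) : a = b := by
  unfold pvMag at h2
  split_ifs at h2 <;> omega

lemma bxor_assoc (a b c : Int) :
    PySem.Int.bxor (PySem.Int.bxor a b) c = PySem.Int.bxor a (PySem.Int.bxor b c) := by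
  apply eq_of_sign_mag
  · simp only [bxor_nonneg_iff]; tauto
  · simp only [pvMag_bxor, Nat.xor_assoc]

lemma foldl_bxor_init (l : List Int) : ∀ (x y : Int),
    l.foldl PySem.Int.bxor (PySem.Int.bxor x y) = PySem.Int.bxor x (l.foldl PySem.Int.bxor y) := by
  induction l with
  | nil => intro x y; rfl
  | cons a t ih => intro x y; simp only [List.foldl_cons, bxor_assoc, ih]

-- Python's list[i] for an in-range, possibly negative index, as a getD on the normalised index.
lemma pyGetD_inrange (xs : List Int) (i : Int) (d : Int)
    (h1 : -(xs.length : Int) ≤ i) (h2 : i < (xs.length : Int)) :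
    PySem.List.pyGetD xs i d = xs.getD (if i < 0 then i + xs.length else i).toNat d := by
  unfold PySem.List.pyGetD PySem.List.pyGet? PySem.List.pyIdx?
  by_cases h : 0 ≤ i
  · rw [if_pos h, if_pos (by omega), if_neg (by omega)]
    simp [List.getD_eq_getElem?_getD]
  · rw [if_neg h, if_pos (by omega), if_pos (by omega)]
    have he : xs.length - (-i).toNat = (i + xs.length).toNat := by omega
    simp [List.getD_eq_getElem?_getD, he]

-- A's first loop: the state list is the prefix-XOR scan.
lemma scan_spec (arr : List Int) : ∀ (pre : List Int) (acc : Int),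
    (arr.foldl (fun (st : List Int × Int) num =>
        (st.1 ++ [PySem.Int.bxor st.2 num], PySem.Int.bxor st.2 num)) (pre, acc)).1 =
      pre ++ (List.range arr.length).map (fun k => (arr.take (k + 1)).foldl PySem.Int.bxor acc) := by
  induction arr with
  | nil => intro pre acc; simp
  | cons a t ih =>
    intro pre acc
    simp only [List.foldl_cons, ih, List.length_cons, List.range_succ_eq_map, List.map_cons,
      List.map_map, List.append_assoc]
    simp [Function.comp_def]

-- the slice arr[:j] for an in-range, possibly negative j, is the take at the normalised index.
lemma slice_to_inrange (arr : List Int) (j : Int)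
    (h1 : -(arr.length : Int) ≤ j) :
    PySem.List.slice arr none (some j) = arr.take (if j < 0 then j + arr.length else j).toNat := by
  by_cases h : j < 0
  · rw [if_pos h, show j = -(((-j).toNat : Nat) : Int) by omega, PySem.List.slice_to_neg_natCast _ _ (by omega)]
    congr 1
    omega
  · rw [if_neg h, show j = ((j.toNat : Nat) : Int) by omega, PySem.List.slice_to_natCast]
    congr 1

-- A's lookup into the prefix table at an in-range Python index equals B's on-the-fly prefixXor.
lemma lookup_eq_prefixXor (arr : List Int) (j : Int)
    (h1 : -(arr.length : Int) ≤ j) (h2 : j < (arr.length : Int)) :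
    PySem.List.pyGetD ((List.range arr.length).map
      (fun k => (arr.take (k + 1)).foldl PySem.Int.bxor 0)) j 0 = prefixXor arr j := by
  set J : Nat := (if j < 0 then j + arr.length else j).toNat with hJ
  have hJlt : J < arr.length := by rw [hJ]; split <;> omega
  have hL : PySem.List.pyGetD ((List.range arr.length).map
      (fun k => (arr.take (k + 1)).foldl PySem.Int.bxor 0)) j 0 =
      (arr.take (J + 1)).foldl PySem.Int.bxor 0 := by
    rw [pyGetD_inrange _ _ _ (by simpa using h1) (by simpa using h2)]
    simp only [List.length_map, List.length_range, ← hJ]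
    exact PySem.List.getD_map_range _ _ _ _ hJlt
  have hsucc : arr.take (J + 1) = arr.take J ++ [arr.getD J 0] := by
    rw [List.take_add_one]
    congr 1
    simp [List.getD_eq_getElem?_getD, hJlt]
  unfold prefixXor
  rw [hL, hsucc, List.foldl_append, slice_to_inrange arr j h1, ← hJ,
    pyGetD_inrange arr j 0 h1 h2, ← hJ]
  simp only [List.foldl_cons, List.foldl_nil]
  rw [show arr.getD J 0 = PySem.Int.bxor (arr.getD J 0) 0 from (PySem.Int.bxor_zero _).symm,
    foldl_bxor_init, PySem.Int.bxor_comm]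
  simp

-- ===== VERDICT (by name: the statement is the Claim_ definition above) =====
theorem xorQueries_spec : Claim_equal_xorQueries := by
  intro arr queries _ hpre
  unfold Spec_xorQueries xorQueries xorQueries_alt
  rw [scan_spec arr [] 0, List.nil_append]
  have hsplit : ∀ (res : List Int) (c : Prop) [Decidable c] (u v : Int),
      (if c then res ++ [u] else res ++ [v]) = res ++ [if c then u else v] := by
    intro res c _ u v; split <;> rfl
  simp only [hsplit]
  rw [PySem.List.foldl_append_singleton_eq_map, PySem.List.foldl_append_singleton_eq_map,
    List.nil_append, List.nil_append]
  apply List.map_congr_left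
  intro q hq
  obtain ⟨_, hb1, hb2, h0⟩ := hpre q hq
  rw [PySem.List.pyGetD_ofNat' q 0, PySem.List.pyGetD_ofNat' q 1,
    lookup_eq_prefixXor arr _ hb1 hb2]
  by_cases hz : q.getD 0 0 = 0
  · rw [if_pos hz, if_neg (not_not_intro hz)]
  · have hb := h0.resolve_left hz
    rw [if_neg hz, if_pos hz, lookup_eq_prefixXor arr _ (by omega) (by omega)]
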